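-- pv_equiv track=rewrite | github.com/pypi-data/pypi-mirror-260 | packages/ArraySplitter/ArraySplitter-1.2.2.tar.gz/ArraySplitter-1.2.2/src/ArraySplitter/decompose.py | iterate_hints
-- ===== SOURCE A (Python) =====
-- def iterate_hints(array, fs_tree, depth):
--     ### Step 3. Find a list of hints (hint is the sequenece for array cutoff)
--
--     current_length = 0
--     buffer = []
--     for L, names, positions in fs_tree:
--         if L != current_length:
--             if buffer:
--                 max_n = 0
--                 found_seq = None
--                 for start, end, N in buffer:
--                     if N > max_n:
--                         max_n = N
--                         found_seq = array[start : end + 1]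
--                 yield current_length, found_seq, max_n
--             buffer = []
--             current_length = L
--             if current_length > depth:
--                 break
--         start = names[0]
--         end = positions[0]
--         N = len(names)
--         buffer.append((start, end, N))
--     if buffer:
--         max_n = 0
--         found_seq = None
--         for start, end, N in buffer:
--             if N > max_n:
--                 max_n = N
--                 found_seq = array[start : end + 1]
--         yield current_length, found_seq, max_n
-- ===== SOURCE B (Python) =====
-- def iterate_hints(array, fs_tree, depth):
--     # Streaming accumulator: one pass, no per-group buffer or inner rescan.
--     current_length = 0
--     max_n = 0
--     found_seq = None
--     group_active = False
--     for L, names, positions in fs_tree: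
--         if L != current_length:
--             if group_active:
--                 yield current_length, found_seq, max_n
--             max_n = 0
--             found_seq = None
--             group_active = False
--             current_length = L
--             if current_length > depth:
--                 break
--         N = len(names)
--         if N > max_n:
--             max_n = N
--             found_seq = array[names[0] : positions[0] + 1]
--         group_active = True
--     if group_active:
--         yield current_length, found_seq, max_n
-- ===== Notes on version B (the rewrite author's own statement) =====
-- stated objective: simpler
-- what changed: Replaces the per-group buffer list and the inner rescan-for-max loop at each flush with a single streaming accumulator (current max_n, found_seq, group_active flag) updated once per entry.
import Mathlib
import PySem

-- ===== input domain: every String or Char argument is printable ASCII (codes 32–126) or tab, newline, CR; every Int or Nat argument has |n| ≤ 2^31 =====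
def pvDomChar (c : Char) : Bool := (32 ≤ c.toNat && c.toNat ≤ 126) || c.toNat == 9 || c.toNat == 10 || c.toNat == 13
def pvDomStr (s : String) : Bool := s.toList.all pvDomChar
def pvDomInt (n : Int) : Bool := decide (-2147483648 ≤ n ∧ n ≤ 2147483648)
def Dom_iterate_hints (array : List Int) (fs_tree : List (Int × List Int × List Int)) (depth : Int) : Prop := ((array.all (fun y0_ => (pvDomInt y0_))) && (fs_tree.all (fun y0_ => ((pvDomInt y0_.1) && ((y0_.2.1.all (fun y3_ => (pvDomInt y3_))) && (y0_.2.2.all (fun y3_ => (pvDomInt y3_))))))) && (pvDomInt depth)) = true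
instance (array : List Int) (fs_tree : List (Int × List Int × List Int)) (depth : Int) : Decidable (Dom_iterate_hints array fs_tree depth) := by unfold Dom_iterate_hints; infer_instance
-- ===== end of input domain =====

-- B replaces A's per-group buffer list + inner rescan at flush by a single streaming
-- accumulator (max_n, found_seq, group_active) updated once per entry: simpler, one pass.


-- ===== PORT A =====
-- A's inner flush loop: scan the buffer, keep the first strict max N and its slice.
-- found_seq's initial Python value None is represented by []; inside Pre_ every buffer
-- entry has N ≥ 1 so the first entry always overwrites it and [] is never emitted.
def pvFlushA (array : List Int) (buffer : List (Int × Int × Int)) : Int × List Int :=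
  buffer.foldl
    (fun acc t =>
      if acc.1 < t.2.2 then (t.2.2, PySem.List.slice array (some t.1) (some (t.2.1 + 1))) else acc)
    (0, [])

-- A's main loop; `names[0]`/`positions[0]` are PySem.List.pyGet? with a junk default 0:
-- Python raises IndexError on an empty list there, and Pre_ excludes those inputs.
def pvIterA (array : List Int) (depth : Int) :
    List (Int × List Int × List Int) → Int → List (Int × Int × Int) →
    List (Int × List Int × Int) → List (Int × List Int × Int)
  | [], cur, buffer, out =>
      if buffer.isEmpty then out
      else out ++ [(cur, (pvFlushA array buffer).2, (pvFlushA array buffer).1)]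
  | (L, names, positions) :: rest, cur, buffer, out =>
      if L ≠ cur then
        let out' := if buffer.isEmpty then out
                    else out ++ [(cur, (pvFlushA array buffer).2, (pvFlushA array buffer).1)]
        if L > depth then out'  -- break: trailing `if buffer:` sees the emptied buffer
        else
          pvIterA array depth rest L
            [(((PySem.List.pyGet? names 0).getD 0), ((PySem.List.pyGet? positions 0).getD 0),
              (names.length : Int))] out'
      else
        pvIterA array depth rest cur
          (buffer ++ [(((PySem.List.pyGet? names 0).getD 0), ((PySem.List.pyGet? positions 0).getD 0),
              (names.length : Int))]) out

def iterate_hints (array : List Int) (fs_tree : List (Int × List Int × List Int)) (depth : Int) : List (Int × List Int × Int) :=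
  pvIterA array depth fs_tree 0 [] []

-- ===== PORT B =====
-- B's streaming loop: state = (current_length, max_n, found_seq, group_active).
def pvIterB (array : List Int) (depth : Int) :
    List (Int × List Int × List Int) → Int → Int → List Int → Bool →
    List (Int × List Int × Int) → List (Int × List Int × Int)
  | [], cur, m, seq, active, out =>
      if active then out ++ [(cur, seq, m)] else out
  | (L, names, positions) :: rest, cur, m, seq, active, out =>
      if L ≠ cur then
        let out' := if active then out ++ [(cur, seq, m)] else out
        if L > depth then out'
        else
          -- reset (max_n = 0, found_seq = None) then update with this entry
          if (0 : Int) < (names.length : Int) then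
            pvIterB array depth rest L (names.length : Int)
              (PySem.List.slice array (some ((PySem.List.pyGet? names 0).getD 0))
                (some (((PySem.List.pyGet? positions 0).getD 0) + 1))) true out'
          else pvIterB array depth rest L 0 [] true out'
      else
        if m < (names.length : Int) then
          pvIterB array depth rest cur (names.length : Int)
            (PySem.List.slice array (some ((PySem.List.pyGet? names 0).getD 0))
              (some (((PySem.List.pyGet? positions 0).getD 0) + 1))) true out
        else pvIterB array depth rest cur m seq true out

def iterate_hints_alt (array : List Int) (fs_tree : List (Int × List Int × List Int)) (depth : Int) : List (Int × List Int × Int) :=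
  pvIterB array depth fs_tree 0 0 [] false []

-- ===== PRECONDITION & SPEC =====
-- Python A evaluates names[0] and positions[0] for every entry it processes, raising
-- IndexError on an empty list; the processed entries are exactly those before the first
-- group boundary (L different from the previous entry's L, or from 0 at index 0) with
-- L > depth. Pre_ requires nonempty names and positions on exactly that prefix, so it
-- holds precisely where Python A returns. (The equivalence proof does not need Pre_:
-- the ports agree on all inputs; Pre_ only excludes the inputs where Python A raises.)
def Pre_iterate_hints (array : List Int) (fs_tree : List (Int × List Int × List Int)) (depth : Int) : Prop :=
  ∀ e ∈ ((fs_tree.zip ((0 : Int) :: fs_tree.map (·.1))).takeWhile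
      (fun p => !(decide (p.1.1 ≠ p.2) && decide (p.1.1 > depth)))),
    e.1.2.1 ≠ [] ∧ e.1.2.2 ≠ []
instance (array : List Int) (fs_tree : List (Int × List Int × List Int)) (depth : Int) : Decidable (Pre_iterate_hints array fs_tree depth) := by unfold Pre_iterate_hints; infer_instance

def pvWitness_iterate_hints : List Int × (List (Int × List Int × List Int)) × Int :=
  ([1, 2, 3], [(1, [0], [1]), (1, [2], [2]), (2, [0, 1], [2])], 5)

def Spec_iterate_hints (array : List Int) (fs_tree : List (Int × List Int × List Int)) (depth : Int) (out : List (Int × List Int × Int)) : Prop := out = iterate_hints_alt array fs_tree depth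
instance (array : List Int) (fs_tree : List (Int × List Int × List Int)) (depth : Int) (out : List (Int × List Int × Int)) : Decidable (Spec_iterate_hints array fs_tree depth out) := by unfold Spec_iterate_hints; infer_instance

-- ===== CLAIM (what is proved, stated in full; the proofs are below) =====
def Claim_equal_iterate_hints : Prop := ∀ (array : List Int) (fs_tree : List (Int × List Int × List Int)) (depth : Int), Dom_iterate_hints array fs_tree depth → Pre_iterate_hints array fs_tree depth → Spec_iterate_hints array fs_tree depth (iterate_hints array fs_tree depth)

-- ===== LEMMAS AND PROOFS =====

-- Key invariant: A's flush-of-buffer equals B's streamed accumulator, where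
-- (m, seq) = pvFlushA array buffer and active = !buffer.isEmpty.
theorem pvIterA_eq_pvIterB (array : List Int) (depth : Int) :
    ∀ (fs : List (Int × List Int × List Int)) (cur : Int) (buffer : List (Int × Int × Int))
      (out : List (Int × List Int × Int)),
      pvIterA array depth fs cur buffer out
        = pvIterB array depth fs cur (pvFlushA array buffer).1 (pvFlushA array buffer).2
            (!buffer.isEmpty) out := by
  intro fs
  induction fs with
  | nil =>
      intro cur buffer out
      cases buffer <;> simp [pvIterA, pvIterB]
  | cons hd rest ih =>
      intro cur buffer out
      obtain ⟨L, names, positions⟩ := hd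
      by_cases hL : L ≠ cur
      · by_cases hd' : L > depth
        · cases buffer <;> simp [pvIterA, pvIterB, hL, hd']
        · have h1 : ∀ t : Int × Int × Int,
              pvFlushA array [t]
                = if (0 : Int) < t.2.2
                  then (t.2.2, PySem.List.slice array (some t.1) (some (t.2.1 + 1)))
                  else (0, []) := by
            intro t; simp [pvFlushA, List.foldl]
          cases buffer with
          | nil =>
              simp only [pvIterA, pvIterB, hL, hd', if_neg, if_pos, List.isEmpty_nil]
              rw [ih]
              rw [h1]
              by_cases hN : 0 < names.length <;> simp [hN, hL, Int.natCast_pos]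
          | cons b bs =>
              simp only [pvIterA, pvIterB, hL, hd', List.isEmpty_cons, Bool.not_false,
                if_true, if_false, ite_true, ite_false, if_neg, if_pos]
              rw [ih]
              rw [h1]
              by_cases hN : 0 < names.length <;> simp [hN, hL, Int.natCast_pos]
      · -- same group: buffer grows by one entry; flush of the grown buffer is one step
        rw [not_not] at hL; subst hL
        have hstep : pvFlushA array (buffer ++
              [(((PySem.List.pyGet? names 0).getD 0), ((PySem.List.pyGet? positions 0).getD 0),
                (names.length : Int))])
            = if (pvFlushA array buffer).1 < (names.length : Int)
              then ((names.length : Int),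
                PySem.List.slice array (some ((PySem.List.pyGet? names 0).getD 0))
                  (some (((PySem.List.pyGet? positions 0).getD 0) + 1)))
              else pvFlushA array buffer := by
          simp [pvFlushA, List.foldl_append]
        have hne : (buffer ++
              [(((PySem.List.pyGet? names 0).getD 0), ((PySem.List.pyGet? positions 0).getD 0),
                (names.length : Int))]).isEmpty = false := by cases buffer <;> rfl
        simp only [pvIterA, pvIterB, ne_eq, not_true_eq_false, if_false, ite_false]
        rw [ih, hstep]
        by_cases hN : (pvFlushA array buffer).1 < (names.length : Int) <;> simp [hN, hne]

-- ===== VERDICT (by name: the statement is the Claim_ definition above) =====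
theorem iterate_hints_spec : Claim_equal_iterate_hints := by
  intro array fs_tree depth _ _
  unfold Spec_iterate_hints iterate_hints iterate_hints_alt
  rw [pvIterA_eq_pvIterB]
  simp [pvFlushA]
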